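-- pv_equiv track=rewrite | github.com/salvacarrion/FindWords | find_words.py | get_missing_vowels
-- ===== SOURCE A (Python) =====
-- def get_missing_vowels(word):
--     vowels = 'aeiou'
--     missing_vowels = ''
--     for vowel in vowels:
--         if vowel not in word:
--             missing_vowels += vowel
--     missing_vowels = set(missing_vowels)
--     return missing_vowels
-- ===== SOURCE B (Python) =====
-- def get_missing_vowels(word):
--     remaining = {'a', 'e', 'i', 'o', 'u'}
--     for ch in word:
--         remaining.discard(ch)
--         if not remaining:
--             break
--     return remaining
-- ===== Notes on version B (the rewrite author's own statement) =====
-- stated objective: alternative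
-- what changed: B traverses the word once, discarding each seen character from a remaining-vowel set and stopping early when the set empties, instead of A's loop over the five vowels each performing a substring-membership scan of the word.
import Mathlib
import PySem

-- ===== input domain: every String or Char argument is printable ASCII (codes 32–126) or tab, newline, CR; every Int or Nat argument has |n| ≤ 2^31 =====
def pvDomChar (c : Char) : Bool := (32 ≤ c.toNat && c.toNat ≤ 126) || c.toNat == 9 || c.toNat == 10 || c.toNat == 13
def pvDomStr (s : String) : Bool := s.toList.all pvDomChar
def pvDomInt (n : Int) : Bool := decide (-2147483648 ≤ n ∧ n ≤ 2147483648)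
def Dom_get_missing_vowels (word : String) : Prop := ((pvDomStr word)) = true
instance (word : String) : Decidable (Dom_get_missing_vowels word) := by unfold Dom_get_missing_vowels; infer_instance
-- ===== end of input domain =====

-- B scans the word once, discarding each seen character from a remaining-vowel set with early exit when it empties, instead of A's loop over the five vowels each testing membership in the word (alternative decomposition, same cost).


-- ===== PORT A =====
-- 'vowel not in word' on a 1-char string is PySem.Str.isIn; set(missing_vowels) iterates the
-- accumulated string's characters as 1-char strings (PySem.Set.ofList of the map).
def get_missing_vowels (word : String) : List String :=
  let vowels := "aeiou"
  let missing_vowels : List Char :=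
    vowels.toList.foldl
      (fun acc vowel => if ¬ (PySem.Str.isIn (String.singleton vowel) word) then acc ++ [vowel] else acc)
      []
  PySem.Set.ofList (missing_vowels.map String.singleton)

-- ===== PORT B =====
-- for ch in word: remaining.discard(ch); if not remaining: break   — structural recursion over the word's characters.
def pvScan (remaining : PySem.Set String) (cs : List Char) : PySem.Set String :=
  match cs with
  | [] => remaining
  | c :: rest =>
      let r := PySem.Set.discard remaining (String.singleton c)
      if r.isEmpty then r else pvScan r rest

def get_missing_vowels_alt (word : String) : List String :=
  pvScan (PySem.Set.ofList ["a", "e", "i", "o", "u"]) word.toList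

-- ===== PRECONDITION & SPEC =====
def Spec_get_missing_vowels (word : String) (out : List String) : Prop := out = get_missing_vowels_alt word
instance (word : String) (out : List String) : Decidable (Spec_get_missing_vowels word out) := by unfold Spec_get_missing_vowels; infer_instance

-- ===== CLAIM (what is proved, stated in full; the proofs are below) =====
def Claim_equal_get_missing_vowels : Prop := ∀ (word : String), Dom_get_missing_vowels word → Spec_get_missing_vowels word (get_missing_vowels word)

-- ===== LEMMAS AND PROOFS =====
theorem singleton_isIn (c : Char) (w : String) :
    PySem.Str.isIn (String.singleton c) w = decide (c ∈ w.toList) := by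
  have h : PySem.Str.isIn (String.singleton c) w = true ↔ c ∈ w.toList := by
    rw [PySem.Str.isIn_iff_infix]
    simp [List.singleton_infix_iff]
  cases hb : PySem.Str.isIn (String.singleton c) w <;> simp_all

theorem mem_map_singleton (c : Char) (l : List Char) :
    String.singleton c ∈ l.map String.singleton ↔ c ∈ l := by
  constructor
  · intro h
    rcases List.mem_map.mp h with ⟨a, ha, hEq⟩
    have : a = c := by
      have := congrArg String.toList hEq
      simpa using this
    exact this ▸ ha
  · exact fun h => List.mem_map.mpr ⟨c, h, rfl⟩

theorem foldl_discard_nil (cs : List Char) :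
    cs.foldl (fun r c => PySem.Set.discard r (String.singleton c)) ([] : List String) = [] := by
  induction cs with
  | nil => rfl
  | cons c rest ih => simpa [PySem.Set.discard] using ih

theorem pvScan_eq_foldl (cs : List Char) (r : PySem.Set String) :
    pvScan r cs = cs.foldl (fun r c => PySem.Set.discard r (String.singleton c)) r := by
  induction cs generalizing r with
  | nil => rfl
  | cons c rest ih =>
    show (let r' := PySem.Set.discard r (String.singleton c);
          if r'.isEmpty then r' else pvScan r' rest) = _
    by_cases h : (PySem.Set.discard r (String.singleton c)).isEmpty
    · have hnil : PySem.Set.discard r (String.singleton c) = [] := by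
        simpa [List.isEmpty_iff] using h
      simp [hnil, foldl_discard_nil]
    · simp [h, ih]

theorem foldl_discard_eq_filter (cs : List Char) (r : List String) :
    cs.foldl (fun r c => PySem.Set.discard r (String.singleton c)) r
      = r.filter (fun v => !(cs.map String.singleton).contains v) := by
  induction cs generalizing r with
  | nil => simp
  | cons c rest ih =>
    rw [List.foldl_cons, ih]
    show (PySem.Set.discard r (String.singleton c)).filter _ = _
    rw [PySem.Set.discard, List.filter_filter]
    apply List.filter_congr
    intro x _
    simp only [List.map_cons, List.contains_cons]
    cases hx : x == String.singleton c <;> simp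

-- ===== VERDICT (by name: the statement is the Claim_ definition above) =====
theorem get_missing_vowels_spec : Claim_equal_get_missing_vowels := by
  intro word _
  unfold Spec_get_missing_vowels get_missing_vowels get_missing_vowels_alt
  rw [pvScan_eq_foldl, foldl_discard_eq_filter]
  show PySem.Set.ofList
      (("aeiou".toList.foldl
        (fun acc vowel => if ¬ (PySem.Str.isIn (String.singleton vowel) word) then acc ++ [vowel] else acc) []).map String.singleton)
    = _
  rw [PySem.List.foldl_append_ite_eq_filter, List.nil_append]
  rw [show (PySem.Set.ofList ["a", "e", "i", "o", "u"] : List String)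
        = "aeiou".toList.map String.singleton from by decide]
  rw [List.filter_map]
  rw [PySem.Set.ofList_eq_self_of_nodup]
  · congr 1
    apply List.filter_congr
    intro x _
    simp only [Function.comp]
    rw [singleton_isIn]
    have hc : ((word.toList.map String.singleton).contains (String.singleton x))
        = decide (x ∈ word.toList) := by
      by_cases h : x ∈ word.toList
      · simp [mem_map_singleton, h]
      · simp [mem_map_singleton, h]
    rw [hc]
    by_cases h : x ∈ word.toList <;> simp [h]
  · apply List.Nodup.map
    · intro a b hab
      have := congrArg String.toList hab
      simpa using this
    · exact List.Nodup.filter _ (by decide)
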